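-- pv_equiv track=rewrite | github.com/dahlkkim9-kgs/spark-sql-optimizer | backend/core/formatter_v4_fixed.py | _cleanup_empty_lines
-- ===== SOURCE A (Python) =====
-- def _cleanup_empty_lines(sql: str) -> str:
--     """清理SQL中的多余空行，增加美观性
--
--     规则：
--     1. 完全删除SQL语句内部的所有空行
--     2. 只在语句之间（分号后）保留一个空行作为分隔
--     3. 清除语句开头和结尾的空行
--     """
--     lines = sql.split('\n')
--
--     # 首先删除所有空行
--     non_empty_lines = [line for line in lines if line.strip() != '']
--
--     # 然后在分号后添加空行作为语句分隔符
--     result_lines = []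
--     for i, line in enumerate(non_empty_lines):
--         result_lines.append(line)
--         # 如果当前行以分号结尾，且不是最后一行，添加一个空行
--         if line.rstrip().endswith(';') and i < len(non_empty_lines) - 1:
--             result_lines.append('')
--
--     return '\n'.join(result_lines)
-- ===== SOURCE B (Python) =====
-- def _cleanup_empty_lines(sql: str) -> str:
--     kept = [line for line in sql.split('\n') if line.strip() != '']
--     groups, current = [], []
--     for line in kept:
--         current.append(line)
--         if line.rstrip().endswith(';'):
--             groups.append(current)
--             current = []
--     if current:
--         groups.append(current)
--     return '\n\n'.join('\n'.join(g) for g in groups)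
-- ===== Notes on version B (the rewrite author's own statement) =====
-- stated objective: alternative
-- what changed: Instead of emitting lines one by one with an index check that inserts an empty line after each non-final semicolon-terminated line, B folds the non-blank lines into statement groups closed at each semicolon line, drops an empty trailing group, and joins the groups with a blank-line separator.
import Mathlib
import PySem

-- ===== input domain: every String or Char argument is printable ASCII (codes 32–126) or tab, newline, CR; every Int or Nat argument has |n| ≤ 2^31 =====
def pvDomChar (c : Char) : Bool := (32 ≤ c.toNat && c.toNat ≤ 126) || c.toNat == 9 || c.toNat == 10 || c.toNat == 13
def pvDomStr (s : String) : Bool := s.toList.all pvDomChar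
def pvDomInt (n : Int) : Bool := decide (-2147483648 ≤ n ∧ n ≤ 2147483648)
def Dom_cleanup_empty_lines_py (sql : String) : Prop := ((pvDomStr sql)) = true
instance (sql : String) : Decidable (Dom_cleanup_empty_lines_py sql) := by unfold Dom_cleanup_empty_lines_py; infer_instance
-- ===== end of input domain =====

-- B folds the non-blank lines into semicolon-terminated statement groups and joins the groups
-- with a blank-line separator, instead of A's indexed pass that inserts an empty line after each
-- non-final semicolon line. Alternative decomposition, same cost; return values proved equal.

-- ===== PORT A =====
-- "this line ends a statement": line.rstrip().endswith(';'), the test both Pythons share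
def pvEnds (l : String) : Bool := PySem.Str.endswith (PySem.Str.rstrip l) ";"

-- one loop iteration of A's `for i, line in enumerate(non_empty_lines)` (n = len(non_empty_lines))
def pvAstep (n : Int) (acc : List String) (p : Int × String) : List String :=
  let acc := acc ++ [p.2]
  if pvEnds p.2 && decide (p.1 < n - 1) then acc ++ [""] else acc

def cleanup_empty_lines_py (sql : String) : String :=
  let lines := (PySem.Chars.splitOn sql.toList ['\n']).map String.ofList
  let nonEmpty := lines.filter (fun line => PySem.Str.strip line != "")
  let resultLines := (PySem.List.enumerate nonEmpty 0).foldl (pvAstep (nonEmpty.length : Int)) []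
  PySem.Str.join "\n" resultLines

-- ===== PORT B =====
-- one loop iteration of B's fold: state = (closed groups, current group)
def pvBstep (st : List (List String) × List String) (line : String) : List (List String) × List String :=
  let cur := st.2 ++ [line]
  if pvEnds line then (st.1 ++ [cur], []) else (st.1, cur)

def cleanup_empty_lines_py_alt (sql : String) : String :=
  let kept := ((PySem.Chars.splitOn sql.toList ['\n']).map String.ofList).filter (fun line => PySem.Str.strip line != "")
  let st := kept.foldl pvBstep ([], [])
  let groups := if st.2.isEmpty then st.1 else st.1 ++ [st.2]
  PySem.Str.join "\n\n" (groups.map (fun g => PySem.Str.join "\n" g))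

-- ===== PRECONDITION & SPEC =====
def Spec_cleanup_empty_lines_py (sql : String) (out : String) : Prop := out = cleanup_empty_lines_py_alt sql
instance (sql : String) (out : String) : Decidable (Spec_cleanup_empty_lines_py sql out) := by unfold Spec_cleanup_empty_lines_py; infer_instance

-- ===== CLAIM (what is proved, stated in full; the proofs are below) =====
def Claim_equal_cleanup_empty_lines_py : Prop := ∀ (sql : String), Dom_cleanup_empty_lines_py sql → Spec_cleanup_empty_lines_py sql (cleanup_empty_lines_py sql)

-- ===== LEMMAS AND PROOFS =====

-- the line sequence A emits, as structural recursion (no blank after the final line)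
def pvBuild : List String → List String
  | [] => []
  | [l] => [l]
  | l :: l' :: rest =>
      if pvEnds l then l :: "" :: pvBuild (l' :: rest) else l :: pvBuild (l' :: rest)

-- the groups B's fold produces, as structural recursion
def pvGroups (cur : List String) : List String → List (List String)
  | [] => if cur.isEmpty then [] else [cur]
  | l :: ls => if pvEnds l then (cur ++ [l]) :: pvGroups [] ls else pvGroups (cur ++ [l]) ls

-- groups concatenated with a blank line between them
def pvCat : List (List String) → List String
  | [] => []
  | [g] => g
  | g :: g' :: gs => g ++ "" :: pvCat (g' :: gs)

-- what A's fold over enumerate produces past index s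
def pvWalk (n : Int) (s : Int) : List String → List String
  | [] => []
  | l :: ls => (l :: if pvEnds l && decide (s < n - 1) then [""] else []) ++ pvWalk n (s + 1) ls

theorem pvA_fold (n : Int) : ∀ (ls : List String) (s : Int) (acc : List String),
    (PySem.List.enumerate ls s).foldl (pvAstep n) acc = acc ++ pvWalk n s ls := by
  intro ls
  induction ls with
  | nil => intro s acc; simp [PySem.List.enumerate_nil, pvWalk]
  | cons l ls ih =>
      intro s acc
      rw [PySem.List.enumerate_cons]
      simp only [List.foldl_cons, ih, pvAstep, pvWalk]
      split_ifs with h <;> simp [h]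

theorem pvWalk_build (n : Int) : ∀ (ls : List String) (s : Int),
    s + ls.length = n → pvWalk n s ls = pvBuild ls := by
  intro ls
  induction ls with
  | nil => intro s _; rfl
  | cons l ls ih =>
      intro s hs
      cases ls with
      | nil =>
          have hnlt : ¬ (s < n - 1) := by simp at hs; omega
          simp [pvWalk, pvBuild, hnlt]
      | cons l' rest =>
          have hlt : s < n - 1 := by simp at hs; omega
          have hrec := ih (s + 1) (by simp at hs ⊢; omega)
          rw [show pvWalk n s (l :: l' :: rest) =
              (l :: if pvEnds l && decide (s < n - 1) then [""] else []) ++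
                pvWalk n (s + 1) (l' :: rest) from rfl, hrec]
          by_cases he : pvEnds l <;> simp [pvBuild, he, hlt]

theorem pvB_fold : ∀ (ls : List String) (gs : List (List String)) (cur : List String),
    (let st := ls.foldl pvBstep (gs, cur);
     if st.2.isEmpty then st.1 else st.1 ++ [st.2]) = gs ++ pvGroups cur ls := by
  intro ls
  induction ls with
  | nil =>
      intro gs cur
      simp only [List.foldl_nil, pvGroups]
      split_ifs <;> simp_all
  | cons l ls ih =>
      intro gs cur
      rw [List.foldl_cons]
      by_cases h : pvEnds l
      · rw [show pvBstep (gs, cur) l = (gs ++ [cur ++ [l]], []) from by simp [pvBstep, h]]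
        rw [ih]
        simp [pvGroups, h]
      · rw [show pvBstep (gs, cur) l = (gs, cur ++ [l]) from by simp [pvBstep, h]]
        rw [ih]
        simp [pvGroups, h]

theorem pvGroups_ne : ∀ (ls cur : List String), cur ≠ [] ∨ ls ≠ [] → pvGroups cur ls ≠ [] := by
  intro ls
  induction ls with
  | nil =>
      intro cur h
      rcases h with h | h
      · simp [pvGroups, h]
      · simp at h
  | cons l ls ih =>
      intro cur _
      simp only [pvGroups]
      split_ifs
      · simp
      · exact ih (cur ++ [l]) (Or.inl (by simp))

theorem pvGroups_mem_ne : ∀ (ls cur : List String) (g : List String),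
    g ∈ pvGroups cur ls → g ≠ [] := by
  intro ls
  induction ls with
  | nil =>
      intro cur g hg
      by_cases hc : cur.isEmpty <;> simp [pvGroups, hc] at hg
      subst hg; simpa using hc
  | cons l ls ih =>
      intro cur g hg
      simp only [pvGroups] at hg
      split_ifs at hg
      · rcases List.mem_cons.mp hg with h | h
        · subst h; simp
        · exact ih [] g h
      · exact ih (cur ++ [l]) g hg

theorem pvCat_groups : ∀ (ls cur : List String), pvCat (pvGroups cur ls) = cur ++ pvBuild ls := by
  intro ls
  induction ls with
  | nil =>
      intro cur
      by_cases hc : cur.isEmpty <;> simp [pvGroups, hc, pvCat, pvBuild]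
      simp at hc; simp [hc]
  | cons l ls ih =>
      intro cur
      simp only [pvGroups]
      cases ls with
      | nil =>
          split_ifs with h <;> simp [pvGroups, pvCat, pvBuild, h]
      | cons l' rest =>
          split_ifs with h
          · have hne := pvGroups_ne (l' :: rest) [] (Or.inr (by simp))
            obtain ⟨g0, gs0, hgs⟩ := List.exists_cons_of_ne_nil hne
            rw [hgs]
            have := ih []
            rw [hgs] at this
            simp only [pvCat, pvBuild, h, if_pos]
            simp at this
            simp [this]
          · rw [ih (cur ++ [l])]
            simp [pvBuild, h]

theorem pvJoin_append (sep : List Char) : ∀ (xs ys : List (List Char)), xs ≠ [] → ys ≠ [] →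
    PySem.Chars.join sep (xs ++ ys) = PySem.Chars.join sep xs ++ sep ++ PySem.Chars.join sep ys := by
  intro xs
  induction xs with
  | nil => intro ys h _; simp at h
  | cons x xs ih =>
      intro ys _ hy
      cases xs with
      | nil =>
          obtain ⟨y, ys', rfl⟩ := List.exists_cons_of_ne_nil hy
          simp [PySem.Chars.join_cons_cons, PySem.Chars.join_singleton]
      | cons x' xs' =>
          have := ih ys (by simp) hy
          simp only [List.cons_append] at this ⊢
          rw [PySem.Chars.join_cons_cons, PySem.Chars.join_cons_cons, this]
          simp

-- char-level version of pvCat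
def pvCatC : List (List (List Char)) → List (List Char)
  | [] => []
  | [g] => g
  | g :: g' :: gs => g ++ [] :: pvCatC (g' :: gs)

theorem pvCatC_map : ∀ (gs : List (List String)),
    (pvCat gs).map String.toList = pvCatC (gs.map (fun g => g.map String.toList)) := by
  intro gs
  induction gs with
  | nil => rfl
  | cons g gs ih =>
      cases gs with
      | nil => rfl
      | cons g' rest =>
          simp only [pvCat, pvCatC, List.map_append, List.map_cons, ih]
          rfl

theorem pvCatC_ne : ∀ (g : List (List Char)) (gs : List (List (List Char))),
    g ≠ [] → pvCatC (g :: gs) ≠ [] := by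
  intro g gs hg
  cases gs <;> simp [pvCatC, hg]

theorem pvJoinC (gs : List (List (List Char))) (h : ∀ g ∈ gs, g ≠ []) :
    PySem.Chars.join ['\n', '\n'] (gs.map (PySem.Chars.join ['\n'])) =
    PySem.Chars.join ['\n'] (pvCatC gs) := by
  induction gs with
  | nil => rfl
  | cons g gs ih =>
      cases gs with
      | nil => simp [pvCatC, PySem.Chars.join_singleton]
      | cons g' rest =>
          have hg : g ≠ [] := h g (by simp)
          have hg' : g' ≠ [] := h g' (by simp)
          have ihh := ih (fun x hx => h x (List.mem_cons_of_mem _ hx))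
          simp only [List.map_cons] at ihh ⊢
          rw [PySem.Chars.join_cons_cons, ihh]
          rw [show pvCatC (g :: g' :: rest) = g ++ [] :: pvCatC (g' :: rest) from rfl]
          rw [pvJoin_append ['\n'] g ([] :: pvCatC (g' :: rest)) hg (by simp)]
          have hcat := pvCatC_ne g' rest hg'
          obtain ⟨c, cs, hcs⟩ := List.exists_cons_of_ne_nil hcat
          rw [hcs, PySem.Chars.join_cons_cons]
          simp

theorem pvStrExt (s t : String) (h : s.toList = t.toList) : s = t := by
  exact String.toList_inj.mp h

theorem pvJoin2 (gs : List (List String)) (h : ∀ g ∈ gs, g ≠ []) :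
    PySem.Str.join "\n\n" (gs.map (fun g => PySem.Str.join "\n" g)) =
    PySem.Str.join "\n" (pvCat gs) := by
  apply pvStrExt
  rw [PySem.Str.toList_join, PySem.Str.toList_join, pvCatC_map, List.map_map]
  have hmap : gs.map (String.toList ∘ fun g => PySem.Str.join "\n" g)
      = (gs.map (fun g => g.map String.toList)).map (PySem.Chars.join "\n".toList) := by
    rw [List.map_map]
    apply List.map_congr_left
    intro g _
    simp [PySem.Str.toList_join]
  rw [hmap]
  rw [show ("\n\n" : String).toList = ['\n', '\n'] from by decide]
  rw [show ("\n" : String).toList = ['\n'] from by decide]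
  apply pvJoinC
  intro g hg
  simp only [List.mem_map] at hg
  obtain ⟨g0, hg0, rfl⟩ := hg
  simpa using h g0 hg0

-- ===== VERDICT (by name: the statement is the Claim_ definition above) =====
theorem cleanup_empty_lines_py_spec : Claim_equal_cleanup_empty_lines_py := by
  intro sql _
  unfold Spec_cleanup_empty_lines_py cleanup_empty_lines_py cleanup_empty_lines_py_alt
  simp only []
  set ne := ((PySem.Chars.splitOn sql.toList ['\n']).map String.ofList).filter (fun line => PySem.Str.strip line != "") with hne
  rw [pvA_fold, pvWalk_build _ ne 0 (by simp)]
  rw [pvB_fold ne [] []]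
  simp only [List.nil_append]
  rw [pvJoin2 _ (fun g hg => pvGroups_mem_ne ne [] g hg), pvCat_groups]
  simp
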